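-- pv_equiv track=rewrite | github.com/Rohinikiet/Assessments | charchange.py | replace_first_char_occurrences
-- ===== SOURCE A (Python) =====
-- def replace_first_char_occurrences(input_str):
--     if len(input_str) <= 1:
--         return input_str
--
--     first_char = input_str[0]
--     modified_str = first_char
--
--     for char in input_str[1:]:
--         if char == first_char:
--             modified_str += '$'
--         else:
--             modified_str += char
--
--     return modified_str
-- ===== SOURCE B (Python) =====
-- def replace_first_char_occurrences(input_str):
--     if len(input_str) <= 1:
--         return input_str
--     first = input_str[0]
--     return first + input_str[1:].replace(first, '$')
-- ===== Notes on version B (the rewrite author's own statement) =====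
-- stated objective: faster
-- what changed: Replaces the explicit per-character loop with string accumulation by a single bulk str.replace on the tail slice, prefixed by the unchanged first character.
import Mathlib
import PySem

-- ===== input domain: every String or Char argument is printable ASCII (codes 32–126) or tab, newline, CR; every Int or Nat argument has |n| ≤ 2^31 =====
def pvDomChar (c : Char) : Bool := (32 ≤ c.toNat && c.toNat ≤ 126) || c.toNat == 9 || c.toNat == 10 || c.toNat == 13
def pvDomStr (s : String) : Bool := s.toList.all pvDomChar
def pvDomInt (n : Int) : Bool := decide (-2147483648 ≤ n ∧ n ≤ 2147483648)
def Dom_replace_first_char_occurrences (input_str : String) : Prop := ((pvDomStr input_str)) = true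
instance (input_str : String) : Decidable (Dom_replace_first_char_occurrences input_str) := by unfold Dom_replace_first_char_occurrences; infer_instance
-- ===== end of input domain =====

-- B replaces A's per-character loop with '+=' accumulation by one bulk str.replace on the tail slice (idiomatic rewrite).


-- ===== PORT A =====
-- the len(input_str) <= 1 guard is the [] / [_] cases of the match; the loop is a foldl over the tail
def replace_first_char_occurrences (input_str : String) : String :=
  match input_str.toList with
  | [] => input_str
  | [_] => input_str
  | first_char :: rest =>
      String.mk (rest.foldl (fun modified_str char =>
        if char == first_char then modified_str ++ ['$'] else modified_str ++ [char]) [first_char])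

-- ===== PORT B =====
def replace_first_char_occurrences_alt (input_str : String) : String :=
  let cs := input_str.toList
  if cs.length ≤ 1 then input_str
  else
    match cs with
    | [] => input_str
    | first :: _ =>
        String.mk (first :: PySem.Chars.replace (PySem.List.slice cs (some 1) none) [first] ['$'])

-- ===== PRECONDITION & SPEC =====
def Spec_replace_first_char_occurrences (input_str : String) (out : String) : Prop := out = replace_first_char_occurrences_alt input_str
instance (input_str : String) (out : String) : Decidable (Spec_replace_first_char_occurrences input_str out) := by unfold Spec_replace_first_char_occurrences; infer_instance

-- ===== CLAIM (what is proved, stated in full; the proofs are below) =====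
def Claim_equal_replace_first_char_occurrences : Prop := ∀ (input_str : String), Dom_replace_first_char_occurrences input_str → Spec_replace_first_char_occurrences input_str (replace_first_char_occurrences input_str)

-- ===== LEMMAS AND PROOFS =====

-- single-char pattern replace.go is a per-character map once the fuel covers the list
lemma replace_go_single (c d : Char) :
    ∀ (l acc : List Char) (fuel : Nat), l.length ≤ fuel →
      PySem.Chars.replace.go [c] [d] fuel l acc
        = acc.reverse ++ l.map (fun x => if x == c then d else x) := by
  intro l
  induction l with
  | nil =>
      intro acc fuel _
      cases fuel <;> simp [PySem.Chars.replace.go]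
  | cons h t ih =>
      intro acc fuel hf
      cases fuel with
      | zero => simp at hf
      | succ n =>
          have hn : t.length ≤ n := by simpa using hf
          by_cases hc : h = c
          · subst hc
            rw [show PySem.Chars.replace.go [h] [d] (n+1) (h::t) acc
                  = PySem.Chars.replace.go [h] [d] n t ([d].reverse ++ acc) by
                simp [PySem.Chars.replace.go, List.isPrefixOf]]
            simp [ih _ n hn]
          · rw [show PySem.Chars.replace.go [c] [d] (n+1) (h::t) acc
                  = PySem.Chars.replace.go [c] [d] n t (h :: acc) by
                simp [PySem.Chars.replace.go, List.isPrefixOf]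
                intro h'; exact absurd h'.symm hc]
            simp [ih _ n hn, hc]

lemma replace_single (c d : Char) (l : List Char) :
    PySem.Chars.replace l [c] [d] = l.map (fun x => if x == c then d else x) := by
  simp [PySem.Chars.replace]
  simpa using replace_go_single c d l [] l.length le_rfl

-- A's accumulating loop is a map
lemma foldl_accum_map (first : Char) :
    ∀ (l acc : List Char),
      l.foldl (fun modified_str char =>
        if char == first then modified_str ++ ['$'] else modified_str ++ [char]) acc
        = acc ++ l.map (fun x => if x == first then '$' else x) := by
  intro l
  induction l with
  | nil => simp
  | cons h t ih =>
      intro acc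
      simp only [List.foldl_cons, List.map_cons]
      rw [ih]
      by_cases hc : h = first <;> simp [hc]

-- ===== VERDICT (by name: the statement is the Claim_ definition above) =====
theorem replace_first_char_occurrences_spec : Claim_equal_replace_first_char_occurrences := by
  intro input_str _
  unfold Spec_replace_first_char_occurrences
  unfold replace_first_char_occurrences replace_first_char_occurrences_alt
  match hcs : input_str.toList with
  | [] => simp
  | [_] => simp
  | first :: h2 :: t =>
      simp only [List.length_cons]
      rw [if_neg (by omega)]
      rw [foldl_accum_map, replace_single]
      simp [PySem.List.slice_from]
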